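-- pv_equiv track=rewrite | github.com/sedooj/CompLab | antlr_syntax_analyzer.py | _looks_like_val_typo
-- ===== SOURCE A (Python) =====
-- def _looks_like_val_typo(text: str) -> bool:
--     candidate = (text or "").strip().lower()
--     target = "val"
--
--     if candidate == "vla":
--         return True
--
--     if abs(len(candidate) - len(target)) > 1:
--         return False
--
--     i = 0
--     j = 0
--     mismatches = 0
--     while i < len(candidate) and j < len(target):
--         if candidate[i] == target[j]:
--             i += 1
--             j += 1
--             continue
--
--         mismatches += 1
--         if mismatches > 1:
--             return False
--
--         if len(candidate) == len(target):
--             i += 1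
--             j += 1
--         elif len(candidate) > len(target):
--             i += 1
--         else:
--             j += 1
--
--     if i < len(candidate) or j < len(target):
--         mismatches += 1
--
--     return mismatches <= 1
-- ===== SOURCE B (Python) =====
-- def _looks_like_val_typo(text: str) -> bool:
--     candidate = (text or "").strip().lower()
--     if candidate == "vla":
--         return True
--     n = len(candidate)
--     if n == 3:
--         return sum(c != t for c, t in zip(candidate, "val")) <= 1
--     if n == 4:
--         return any(candidate[:k] + candidate[k + 1:] == "val" for k in range(4))
--     if n == 2:
--         return candidate in ("al", "vl", "va")
--     return False
-- ===== Notes on version B (the rewrite author's own statement) =====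
-- stated objective: simpler
-- what changed: Replaced A's greedy two-pointer mismatch scan over candidate and 'val' with explicit per-length case analysis: Hamming-substitution count for length 3, a one-character-deletion test for length 4, an enumeration of the three one-character-deletions of 'val' for length 2, keeping the 'vla' special case.
import Mathlib
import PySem

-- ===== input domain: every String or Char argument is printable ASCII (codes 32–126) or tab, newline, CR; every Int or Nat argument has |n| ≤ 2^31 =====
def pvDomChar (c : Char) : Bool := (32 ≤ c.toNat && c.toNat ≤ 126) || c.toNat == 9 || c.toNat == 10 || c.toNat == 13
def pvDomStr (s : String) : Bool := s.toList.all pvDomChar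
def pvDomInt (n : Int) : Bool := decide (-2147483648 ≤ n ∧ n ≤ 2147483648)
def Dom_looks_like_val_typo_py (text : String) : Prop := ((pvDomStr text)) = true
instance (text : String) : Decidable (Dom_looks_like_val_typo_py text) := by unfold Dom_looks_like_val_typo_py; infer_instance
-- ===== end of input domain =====

-- B replaces A's greedy two-pointer mismatch scan by explicit per-length case analysis
-- (Hamming count for length 3, one-deletion test for length 4, enumeration for length 2); objective: simpler.

-- ===== PORT A =====
def pvTargetA : List Char := ['v', 'a', 'l']

-- the while loop of A, on (candidate, i, j, mismatches); falls through to the tail check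
def pvLoopA (cand : List Char) (i j m : Nat) : Bool :=
  if h : i < cand.length ∧ j < pvTargetA.length then
    if cand[i]'h.1 = pvTargetA[j]'h.2 then
      pvLoopA cand (i + 1) (j + 1) m
    else if m + 1 > 1 then
      false
    else if cand.length = pvTargetA.length then
      pvLoopA cand (i + 1) (j + 1) (m + 1)
    else if cand.length > pvTargetA.length then
      pvLoopA cand (i + 1) j (m + 1)
    else
      pvLoopA cand i (j + 1) (m + 1)
  else
    decide ((if i < cand.length ∨ j < pvTargetA.length then m + 1 else m) ≤ 1)
termination_by (cand.length - i) + (pvTargetA.length - j)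
decreasing_by all_goals (obtain ⟨h1, h2⟩ := h; simp only [pvTargetA, List.length] at h2 ⊢; omega)

def pvBodyA (cand : List Char) : Bool :=
  if cand = ['v', 'l', 'a'] then true
  else if ((cand.length : Int) - (pvTargetA.length : Int)).natAbs > 1 then false
  else pvLoopA cand 0 0 0

def looks_like_val_typo_py (text : String) : Bool :=
  pvBodyA (PySem.Chars.lower (PySem.Chars.strip text.toList))

-- ===== PORT B =====
def pvBodyB (cand : List Char) : Bool :=
  if cand = ['v', 'l', 'a'] then true
  else if cand.length = 3 then
    decide ((cand.zip ['v', 'a', 'l']).countP (fun p => p.1 != p.2) ≤ 1)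
  else if cand.length = 4 then
    (List.range 4).any (fun k => cand.take k ++ cand.drop (k + 1) = ['v', 'a', 'l'])
  else if cand.length = 2 then
    decide (cand = ['a', 'l']) || decide (cand = ['v', 'l']) || decide (cand = ['v', 'a'])
  else false

def looks_like_val_typo_py_alt (text : String) : Bool :=
  pvBodyB (PySem.Chars.lower (PySem.Chars.strip text.toList))

-- ===== PRECONDITION & SPEC =====
def Spec_looks_like_val_typo_py (text : String) (out : Bool) : Prop := out = looks_like_val_typo_py_alt text
instance (text : String) (out : Bool) : Decidable (Spec_looks_like_val_typo_py text out) := by unfold Spec_looks_like_val_typo_py; infer_instance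

-- ===== CLAIM (what is proved, stated in full; the proofs are below) =====
def Claim_equal_looks_like_val_typo_py : Prop := ∀ (text : String), Dom_looks_like_val_typo_py text → Spec_looks_like_val_typo_py text (looks_like_val_typo_py text)

-- ===== LEMMAS AND PROOFS =====

set_option maxHeartbeats 4000000 in
lemma pvBody_eq (cand : List Char) : pvBodyA cand = pvBodyB cand := by
  rcases cand with _ | ⟨a, _ | ⟨b, _ | ⟨c, _ | ⟨d, _ | ⟨e, rest⟩⟩⟩⟩⟩
  · decide
  · simp [pvBodyA, pvBodyB, pvTargetA]
  · -- length 2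
    by_cases h1 : a = 'v' <;> by_cases h2 : a = 'a' <;> by_cases h3 : b = 'a' <;> by_cases h4 : b = 'l' <;>
      simp_all [pvBodyA, pvBodyB, pvLoopA, pvTargetA]
  · -- length 3
    by_cases h1 : a = 'v' <;> by_cases h2 : b = 'a' <;> by_cases h3 : c = 'l' <;>
    by_cases h4 : b = 'l' <;> by_cases h5 : c = 'a' <;>
      simp_all [pvBodyA, pvBodyB, pvLoopA, pvTargetA]
  · -- length 4
    by_cases h1 : a = 'v' <;> by_cases h2 : b = 'v' <;> by_cases h3 : b = 'a' <;>
    by_cases h4 : c = 'a' <;> by_cases h5 : c = 'l' <;> by_cases h6 : d = 'l' <;>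
      simp_all [pvBodyA, pvBodyB, pvLoopA, pvTargetA, List.range_succ]
  · -- length ≥ 5
    simp [pvBodyA, pvBodyB, pvTargetA]
    omega

-- ===== VERDICT (by name: the statement is the Claim_ definition above) =====
theorem looks_like_val_typo_py_spec : Claim_equal_looks_like_val_typo_py := by
  intro text _
  unfold Spec_looks_like_val_typo_py looks_like_val_typo_py looks_like_val_typo_py_alt
  exact pvBody_eq _
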